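-- pv_equiv track=rewrite | github.com/DHKim95/TIL | Algorithm Study/필수문제/test2.py | solution
-- ===== SOURCE A (Python) =====
-- def solution(names, homes, grades):
--     answer = []
--     sort_people = []
--     for name, home, grade in zip(names, homes, grades):
--         sort_people.append((name, home, grade))
--
--     sort_people = sorted(sort_people, key=lambda x: (-int(x[2]), -(x[1][0] ** 2 + x[1][1] ** 2), x[0]))
--
--     for name in names:
--         for people in range(len(sort_people)):
--             if name == sort_people[people][0]:
--                 answer.append(people+1)
--                 break
--
--     return answer
-- ===== SOURCE B (Python) =====
-- def solution(names, homes, grades):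
--     # No sort: a person's rank is 1 + the number of people strictly ahead under
--     # the (grade desc, distance^2 desc, name asc) order; computed once per
--     # distinct name against that name's best-ranked carrier.
--     def key(nm, home, g):
--         return (-int(g), -(home[0] ** 2 + home[1] ** 2), nm)
--     keys = [key(nm, home, g) for nm, home, g in zip(names, homes, grades)]
--     rank = {}
--     for name in dict.fromkeys(names):
--         cand = [k for k in keys if k[2] == name]
--         if cand:
--             best = min(cand)
--             rank[name] = 1 + sum(1 for k in keys if k < best)
--     return [rank[name] for name in names if name in rank]
-- ===== Notes on version B (the rewrite author's own statement) =====
-- stated objective: alternative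
-- what changed: B eliminates the sort entirely: each rank is computed directly as 1 + the number of people strictly ahead (grade desc, distance-squared desc, name asc) of the queried name's best-ranked carrier, memoized once per distinct name in a dict instead of sorting and linearly scanning the sorted list per query.
import Mathlib
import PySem

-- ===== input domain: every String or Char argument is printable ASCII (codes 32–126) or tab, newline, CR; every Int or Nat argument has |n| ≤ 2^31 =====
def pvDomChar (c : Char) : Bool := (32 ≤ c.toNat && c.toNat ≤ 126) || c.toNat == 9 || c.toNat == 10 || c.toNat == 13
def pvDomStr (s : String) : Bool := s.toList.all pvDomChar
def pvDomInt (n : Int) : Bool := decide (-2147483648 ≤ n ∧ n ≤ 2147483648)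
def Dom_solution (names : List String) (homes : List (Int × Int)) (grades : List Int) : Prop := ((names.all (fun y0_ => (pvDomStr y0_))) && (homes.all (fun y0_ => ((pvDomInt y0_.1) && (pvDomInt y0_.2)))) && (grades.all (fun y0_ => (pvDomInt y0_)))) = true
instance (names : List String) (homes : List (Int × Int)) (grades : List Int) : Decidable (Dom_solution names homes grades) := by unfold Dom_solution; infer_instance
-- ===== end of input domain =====

-- B avoids the sort: each rank is computed as 1 + the number of people strictly
-- ahead of the queried name's best-ranked carrier (objective: alternative algorithm).

-- Python's zip over three lists (truncates to the shortest), shared by both ports.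
def pvZip3 : List String → List (Int × Int) → List Int → List (String × (Int × Int) × Int)
  | n :: ns, h :: hs, g :: gs => (n, h, g) :: pvZip3 ns hs gs
  | _, _, _ => []

-- ===== PORT A =====
-- inner loop 'for people in range(len(sort_people)): if name == ...: append(people+1); break'
-- as a linear scan carrying the 1-based position to append on the first hit
def pvScanA (s : List (String × (Int × Int) × Int)) (name : String) (i : Int) : Option Int :=
  match s with
  | [] => none
  | p :: t => if name == p.1 then some i else pvScanA t name (i + 1)

def solution (names : List String) (homes : List (Int × Int)) (grades : List Int) : List Int :=
  let sort_people := pvZip3 names homes grades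
  -- key=lambda x: (-int(x[2]), -(x[1][0]**2 + x[1][1]**2), x[0]); tuple order = lexicographic
  let sort_people := PySem.List.sorted sort_people
    (fun x => toLex (-x.2.2, toLex (-(x.2.1.1 ^ 2 + x.2.1.2 ^ 2), x.1)) : _ → Int ×ₗ Int ×ₗ String)
  names.foldl (fun answer name =>
    match pvScanA sort_people name 1 with
    | some j => answer ++ [j]
    | none => answer) []

-- ===== PORT B =====
def pvKeyB (nm : String) (home : Int × Int) (g : Int) : Int ×ₗ Int ×ₗ String :=
  toLex (-g, toLex (-(home.1 ^ 2 + home.2 ^ 2), nm))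

def solution_alt (names : List String) (homes : List (Int × Int)) (grades : List Int) : List Int :=
  let keys := (pvZip3 names homes grades).map (fun t => pvKeyB t.1 t.2.1 t.2.2)
  -- one rank per distinct name ('for name in dict.fromkeys(names)'), kept in a dict
  let rank : PySem.Dict String Int := (PySem.List.dedup names).foldl (fun rank name =>
    match keys.filter (fun k => (ofLex (ofLex k).2).2 == name) with
    | [] => rank
    | c :: t =>
        rank.insert name (1 + (keys.countP (fun k => decide (k < t.foldl min c)) : Int))) PySem.Dict.empty
  -- [rank[name] for name in names if name in rank]
  names.foldl (fun answer name =>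
    match rank.get? name with
    | some r => answer ++ [r]
    | none => answer) []

-- ===== PRECONDITION & SPEC =====
def Spec_solution (names : List String) (homes : List (Int × Int)) (grades : List Int) (out : List Int) : Prop := out = solution_alt names homes grades
instance (names : List String) (homes : List (Int × Int)) (grades : List Int) (out : List Int) : Decidable (Spec_solution names homes grades out) := by unfold Spec_solution; infer_instance

-- ===== CLAIM (what is proved, stated in full; the proofs are below) =====
def Claim_equal_solution : Prop := ∀ (names : List String) (homes : List (Int × Int)) (grades : List Int), Dom_solution names homes grades → Spec_solution names homes grades (solution names homes grades)

-- ===== LEMMAS AND PROOFS =====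

-- the sort key, as used (definitionally) by both ports
def pvKey (t : String × (Int × Int) × Int) : Int ×ₗ Int ×ₗ String :=
  toLex (-t.2.2, toLex (-(t.2.1.1 ^ 2 + t.2.1.2 ^ 2), t.1))

theorem pvKey_name_eq {a b : String × (Int × Int) × Int} (h : pvKey a = pvKey b) : a.1 = b.1 :=
  congrArg (fun k => (ofLex (ofLex k).2).2) h

theorem pv_foldl_min_mem' {κ : Type} [LinearOrder κ] (t : List κ) (c : κ) :
    t.foldl min c ∈ c :: t := by
  rcases PySem.List.foldl_min_mem t c with h | h
  · simp [h]
  · exact List.mem_cons_of_mem _ h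

theorem pv_foldl_min_le' {κ : Type} [LinearOrder κ] (t : List κ) (c : κ) :
    ∀ y ∈ c :: t, t.foldl min c ≤ y := by
  intro y hy
  rcases List.mem_cons.mp hy with rfl | hy
  · exact (PySem.List.foldl_min_le t y).1
  · exact (PySem.List.foldl_min_le t c).2 y hy

theorem pv_foldl_min_perm {κ : Type} [LinearOrder κ] {c c' : κ} {t t' : List κ}
    (h : (c :: t).Perm (c' :: t')) : t.foldl min c = t'.foldl min c' := by
  apply le_antisymm
  · exact pv_foldl_min_le' t c _ (h.mem_iff.mpr (pv_foldl_min_mem' t' c'))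
  · exact pv_foldl_min_le' t' c' _ (h.mem_iff.mp (pv_foldl_min_mem' t c))

-- core: on a key-sorted list, the 1-based position of the first carrier of `name`
-- is i + (number of people whose key is strictly below the minimal key of `name`'s carriers)
theorem pvScanA_core (s : List (String × (Int × Int) × Int))
    (hp : s.Pairwise (fun a b => pvKey a ≤ pvKey b)) (name : String) (i : Int) :
    pvScanA s name i =
      match (s.filter (fun p => p.1 == name)).map pvKey with
      | [] => none
      | c :: t => some (i + (s.countP (fun p => decide (pvKey p < t.foldl min c)) : Int)) := by
  induction s generalizing i with
  | nil => simp [pvScanA]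
  | cons p t ih =>
    rcases List.pairwise_cons.mp hp with ⟨hle, htp⟩
    by_cases hn : p.1 = name
    · -- first hit: scan returns i; the minimal key is pvKey p and nothing is below it
      have hfilter : (p :: t).filter (fun q => q.1 == name) =
          p :: t.filter (fun q => q.1 == name) := by simp [hn]
      have hbest : ((t.filter (fun q => q.1 == name)).map pvKey).foldl min (pvKey p) = pvKey p := by
        apply le_antisymm
        · exact (PySem.List.foldl_min_le _ _).1
        · rcases PySem.List.foldl_min_mem ((t.filter (fun q => q.1 == name)).map pvKey) (pvKey p)
            with h | h
          · exact le_of_eq h.symm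
          · rcases List.mem_map.mp h with ⟨q, hq, hkq⟩
            exact hkq ▸ hle q (List.mem_of_mem_filter hq)
      have hcount : (p :: t).countP (fun q => decide (pvKey q < pvKey p)) = 0 := by
        rw [List.countP_eq_zero]
        intro q hq
        rcases List.mem_cons.mp hq with rfl | hq
        · simp
        · simpa using not_lt_of_ge (hle q hq)
      simp only [pvScanA, hn, beq_self_eq_true, if_true, hfilter, List.map_cons, hbest, hcount]
      simp
    · -- no hit at the head: every later carrier's key is strictly above pvKey p
      have hfilter : (p :: t).filter (fun q => q.1 == name) =
          t.filter (fun q => q.1 == name) := by simp [hn]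
      have hscan : pvScanA (p :: t) name i = pvScanA t name (i + 1) := by
        have hne : (name == p.1) = false := by simpa using fun h => hn (Eq.symm h)
        simp [pvScanA, hne]
      rw [hscan, ih htp (i + 1), hfilter]
      cases hc : (t.filter (fun q => q.1 == name)).map pvKey with
      | nil => simp
      | cons c u =>
        have hbestmem : u.foldl min c ∈ c :: u := pv_foldl_min_mem' u c
        rw [← hc] at hbestmem
        rcases List.mem_map.mp hbestmem with ⟨q, hq, hkq⟩
        have hqn : q.1 = name := by simpa using (List.mem_filter.mp hq).2
        have hlt : pvKey p < u.foldl min c := by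
          rcases lt_or_eq_of_le (hle q (List.mem_of_mem_filter hq)) with h | h
          · exact hkq ▸ h
          · exact absurd (pvKey_name_eq h ▸ hqn) hn
        have : (p :: t).countP (fun q => decide (pvKey q < u.foldl min c)) =
            t.countP (fun q => decide (pvKey q < u.foldl min c)) + 1 := by
          simp [hlt]
        simp only [this]
        push_cast
        ring_nf

-- the per-name option computed by A's scan over the sorted list equals B's count form over the raw list
theorem pv_opt_eq (P : List (String × (Int × Int) × Int)) (name : String) :
    pvScanA (PySem.List.sorted P pvKey) name 1 =
      match (P.filter (fun p => p.1 == name)).map pvKey with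
      | [] => none
      | c :: t => some (1 + (P.countP (fun p => decide (pvKey p < t.foldl min c)) : Int)) := by
  have hperm : (PySem.List.sorted P pvKey).Perm P := PySem.List.sorted_perm P pvKey false
  have hpairs := PySem.List.sorted_pairwise P pvKey
  rw [pvScanA_core _ hpairs name 1]
  have hfperm : ((PySem.List.sorted P pvKey).filter (fun p => p.1 == name)).map pvKey
      |>.Perm ((P.filter (fun p => p.1 == name)).map pvKey) := (hperm.filter _).map pvKey
  cases hcs : ((PySem.List.sorted P pvKey).filter (fun p => p.1 == name)).map pvKey with
  | nil =>
    rw [hcs] at hfperm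
    rw [List.nil_perm.mp hfperm]
  | cons c t =>
    rw [hcs] at hfperm
    cases hcp : (P.filter (fun p => p.1 == name)).map pvKey with
    | nil => rw [hcp] at hfperm; exact absurd hfperm.symm (by simp)
    | cons c' t' =>
      rw [hcp] at hfperm
      have hbest : t.foldl min c = t'.foldl min c' := pv_foldl_min_perm hfperm
      simp only [hbest, hperm.countP_eq]

-- the value B's dict loop stores for a given name (none = no carrier, nothing stored)
def pvOptB (keys : List (Int ×ₗ Int ×ₗ String)) (name : String) : Option Int :=
  match keys.filter (fun k => (ofLex (ofLex k).2).2 == name) with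
  | [] => none
  | c :: t => some (1 + (keys.countP (fun k => decide (k < t.foldl min c)) : Int))

-- lookup into the dict built by B's loop over the (deduplicated) names
theorem pv_get?_rank (keys : List (Int ×ₗ Int ×ₗ String)) (l : List String)
    (d : PySem.Dict String Int) (nm : String) :
    (l.foldl (fun rank name =>
        match keys.filter (fun k => (ofLex (ofLex k).2).2 == name) with
        | [] => rank
        | c :: t =>
            rank.insert name (1 + (keys.countP (fun k => decide (k < t.foldl min c)) : Int))) d).get? nm
      = if nm ∈ l ∧ (pvOptB keys nm).isSome then pvOptB keys nm else d.get? nm := by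
  induction l generalizing d with
  | nil => simp
  | cons x l ih =>
    rw [List.foldl_cons, ih]
    by_cases hmem : nm ∈ l ∧ (pvOptB keys nm).isSome
    · simp [hmem]
    · rw [if_neg hmem]
      by_cases hx : nm = x
      · subst hx
        cases hf : keys.filter (fun k => (ofLex (ofLex k).2).2 == nm) with
        | nil => simp [pvOptB, hf]
        | cons c t =>
          simp only [hf, PySem.Dict.get?_insert_self, pvOptB]
          simp
      · have hnm : (nm ∈ x :: l ∧ (pvOptB keys nm).isSome) ↔ (nm ∈ l ∧ (pvOptB keys nm).isSome) := by
          simp [List.mem_cons, hx]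
        rw [if_neg (fun h => hmem (hnm.mp h))]
        cases hf : keys.filter (fun k => (ofLex (ofLex k).2).2 == x) with
        | nil => rfl
        | cons c t => exact PySem.Dict.get?_insert_of_ne _ _ hx

-- ===== VERDICT (by name: the statement is the Claim_ definition above) =====
theorem solution_spec : Claim_equal_solution := by
  intro names homes grades _
  unfold Spec_solution solution solution_alt
  apply PySem.List.foldl_congr_mem
  intro answer name hname
  have hkeyA : (fun x : String × (Int × Int) × Int =>
      (toLex (-x.2.2, toLex (-(x.2.1.1 ^ 2 + x.2.1.2 ^ 2), x.1)) : Int ×ₗ Int ×ₗ String)) = pvKey := rfl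
  rw [hkeyA, pv_opt_eq (pvZip3 names homes grades) name, pv_get?_rank]
  have hkeys : (pvZip3 names homes grades).map (fun t => pvKeyB t.1 t.2.1 t.2.2)
      = (pvZip3 names homes grades).map pvKey := rfl
  have hfil : ((pvZip3 names homes grades).map pvKey).filter
        (fun k => (ofLex (ofLex k).2).2 == name)
      = ((pvZip3 names homes grades).filter (fun p => p.1 == name)).map pvKey := by
    rw [List.filter_map]; rfl
  cases hc : ((pvZip3 names homes grades).filter (fun p => p.1 == name)).map pvKey with
  | nil =>
    have hopt : pvOptB ((pvZip3 names homes grades).map (fun t => pvKeyB t.1 t.2.1 t.2.2)) name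
        = none := by
      unfold pvOptB
      rw [hkeys, hfil, hc]
    simp [hopt]
  | cons c t =>
    have hopt : pvOptB ((pvZip3 names homes grades).map (fun t => pvKeyB t.1 t.2.1 t.2.2)) name
        = some (1 + ((pvZip3 names homes grades).countP
            (fun p => decide (pvKey p < t.foldl min c)) : Int)) := by
      unfold pvOptB
      rw [hkeys, hfil, hc]
      simp only [List.countP_map]
      rfl
    simp [hopt, hname]
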